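-- pv_equiv track=rewrite | github.com/ayeeshi-poosarla/parallel_translation_alignment | distributed_computing/testingcombined.py | rank_proteins_by_matches
-- ===== SOURCE A (Python) =====
-- from typing import List, Tuple
--
-- def build_kmer_index(reference: str, protein: str, k: int) -> dict:
--     kmer_map = {}
--     for i in range(len(reference) - k + 1):
--         kmer = reference[i:i + k]
--         match_positions = [
--             j for j in range(len(protein) - k + 1) if protein[j:j + k] == kmer
--         ]
--         if match_positions:
--             kmer_map[kmer] = match_positions
--     return kmer_map
--
-- def get_top_kmer_match(kmer_map: dict) -> Tuple[str, int]:
--     if not kmer_map: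
--         return None, 0
--     top_kmer = max(kmer_map, key=lambda k: len(kmer_map[k]))
--     return top_kmer, len(kmer_map[top_kmer])
--
-- def rank_proteins_by_matches(reference: str, proteins: List[str], k: int) -> List[str]:
--     protein_match_data = []
--     for protein in proteins:
--         kmer_map = build_kmer_index(reference, protein, k)
--         _, max_matches = get_top_kmer_match(kmer_map)
--         protein_match_data.append((protein, max_matches))
--
--     # Sort proteins by the number of matches in descending order
--     protein_match_data.sort(key=lambda x: x[1], reverse=True)
--     return [protein for protein, _ in protein_match_data]
-- ===== SOURCE B (Python) =====
-- def _best_count(protein, ref_kmers, k):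
--     counts = {}
--     for j in range(len(protein) - k + 1):
--         km = protein[j:j + k]
--         counts[km] = counts.get(km, 0) + 1
--     best = 0
--     for km in ref_kmers:
--         c = counts.get(km, 0)
--         if c > best:
--             best = c
--     return best
--
-- def rank_proteins_by_matches(reference, proteins, k):
--     ref_kmers = {reference[i:i + k] for i in range(len(reference) - k + 1)}
--     scored = [(p, _best_count(p, ref_kmers, k)) for p in proteins]
--     scored.sort(key=lambda x: x[1], reverse=True)
--     return [p for p, _ in scored]
-- ===== Notes on version B (the rewrite author's own statement) =====
-- stated objective: faster
-- what changed: B counts each protein's k-mer occurrences once in a hash map and takes the max count over the distinct reference k-mers, instead of A's rescanning the whole protein once per reference k-mer position (and it never materialises position lists).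
import Mathlib
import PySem

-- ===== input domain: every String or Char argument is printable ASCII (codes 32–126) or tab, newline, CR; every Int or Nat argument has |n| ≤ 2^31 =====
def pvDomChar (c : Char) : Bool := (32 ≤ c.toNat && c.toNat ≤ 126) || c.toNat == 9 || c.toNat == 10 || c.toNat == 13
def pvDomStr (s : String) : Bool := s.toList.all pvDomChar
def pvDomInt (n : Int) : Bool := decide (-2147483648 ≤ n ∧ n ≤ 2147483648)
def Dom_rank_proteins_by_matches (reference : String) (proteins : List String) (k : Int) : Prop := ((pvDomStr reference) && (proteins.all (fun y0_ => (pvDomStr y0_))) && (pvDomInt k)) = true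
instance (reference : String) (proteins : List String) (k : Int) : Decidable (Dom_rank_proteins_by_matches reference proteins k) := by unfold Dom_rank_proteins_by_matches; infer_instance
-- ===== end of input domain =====

-- B hash-counts each protein's k-mers once and maxes the counts over the distinct
-- reference k-mers, instead of A's per-reference-k-mer rescans of the protein (objective: faster).

-- ===== PORT A =====
def build_kmer_index (reference : String) (protein : String) (k : Int) : PySem.Dict String (List Int) :=
  (PySem.List.pyRange 0 (PySem.Str.len reference - k + 1) 1).foldl
    (fun kmer_map i =>
      let kmer := PySem.Str.slice reference (some i) (some (i + k))
      let match_positions := (PySem.List.pyRange 0 (PySem.Str.len protein - k + 1) 1).filter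
        (fun j => PySem.Str.slice protein (some j) (some (j + k)) == kmer)
      if !match_positions.isEmpty then kmer_map.insert kmer match_positions else kmer_map)
    PySem.Dict.empty

def get_top_kmer_match (kmer_map : PySem.Dict String (List Int)) : Option String × Int :=
  if kmer_map.items.isEmpty then (none, 0)
  else
    match PySem.List.max? kmer_map.keys (fun kk => PySem.List.len (kmer_map.getD kk [])) with
    | some top_kmer => (some top_kmer, PySem.List.len (kmer_map.getD top_kmer []))
    | none => (none, 0)   -- unreachable: under the guard the dict is nonempty (Python's max gets a nonempty iterable)

def rank_proteins_by_matches (reference : String) (proteins : List String) (k : Int) : List String :=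
  let protein_match_data : List (String × Int) := proteins.foldl
    (fun acc protein =>
      let kmer_map := build_kmer_index reference protein k
      let max_matches := (get_top_kmer_match kmer_map).2
      acc ++ [(protein, max_matches)])
    []
  (PySem.List.sorted protein_match_data (fun x => x.2) true).map (fun x => x.1)

-- ===== PORT B =====
def pvBestCount (protein : String) (ref_kmers : PySem.Set String) (k : Int) : Int :=
  let counts : PySem.Dict String Int := (PySem.List.pyRange 0 (PySem.Str.len protein - k + 1) 1).foldl
    (fun d j =>
      let km := PySem.Str.slice protein (some j) (some (j + k))
      d.insert km (d.getD km 0 + 1))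
    PySem.Dict.empty
  ref_kmers.foldl
    (fun best km =>
      let c := counts.getD km 0
      if c > best then c else best)
    0

def rank_proteins_by_matches_alt (reference : String) (proteins : List String) (k : Int) : List String :=
  let ref_kmers : PySem.Set String := PySem.Set.ofList
    ((PySem.List.pyRange 0 (PySem.Str.len reference - k + 1) 1).map
      (fun i => PySem.Str.slice reference (some i) (some (i + k))))
  let scored := proteins.map (fun p => (p, pvBestCount p ref_kmers k))
  (PySem.List.sorted scored (fun x => x.2) true).map (fun x => x.1)

-- ===== PRECONDITION & SPEC =====
def Spec_rank_proteins_by_matches (reference : String) (proteins : List String) (k : Int) (out : List String) : Prop := out = rank_proteins_by_matches_alt reference proteins k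
instance (reference : String) (proteins : List String) (k : Int) (out : List String) : Decidable (Spec_rank_proteins_by_matches reference proteins k out) := by unfold Spec_rank_proteins_by_matches; infer_instance

-- ===== CLAIM (what is proved, stated in full; the proofs are below) =====
def Claim_equal_rank_proteins_by_matches : Prop := ∀ (reference : String) (proteins : List String) (k : Int), Dom_rank_proteins_by_matches reference proteins k → Spec_rank_proteins_by_matches reference proteins k (rank_proteins_by_matches reference proteins k)

-- ===== LEMMAS AND PROOFS =====

/-- The list of reference (resp. protein) k-mer slices, in position order. -/
def pvL (s : String) (k : Int) : List String :=
  (PySem.List.pyRange 0 (PySem.Str.len s - k + 1) 1).map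
    (fun i => PySem.Str.slice s (some i) (some (i + k)))

/-- A's match-position list for one k-mer. -/
def pvM (protein : String) (k : Int) (kmer : String) : List Int :=
  (PySem.List.pyRange 0 (PySem.Str.len protein - k + 1) 1).filter
    (fun j => PySem.Str.slice protein (some j) (some (j + k)) == kmer)

/-- The reference k-mers A actually keeps in its dict (those occurring in the protein). -/
def pvF (reference : String) (protein : String) (k : Int) : List String :=
  (pvL reference k).filter (fun s => !(pvM protein k s).isEmpty)

theorem pvCount_pvL (p : String) (k : Int) (s : String) :
    List.count s (pvL p k) = (pvM p k s).length := by
  simp [pvL, pvM, List.count, List.countP_eq_length_filter, List.filter_map, Function.comp_def]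

theorem pvGetD_foldl_insert_const {κ ν : Type} [BEq κ] [LawfulBEq κ] [DecidableEq κ]
    (v : κ → ν) (l : List κ) (d : PySem.Dict κ ν) (s : κ) (d0 : ν) :
    (l.foldl (fun d x => d.insert x (v x)) d).getD s d0
      = if s ∈ l then v s else d.getD s d0 := by
  induction l generalizing d with
  | nil => simp
  | cons x xs ih =>
    simp only [List.foldl_cons, ih, PySem.Dict.getD_insert, List.mem_cons]
    by_cases hmem : s ∈ xs
    · simp [hmem]
    · by_cases hx : s = x
      · subst hx; simp [hmem]
      · simp [hmem, hx]

theorem pvBuildA_eq (reference protein : String) (k : Int) :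
    build_kmer_index reference protein k
      = (pvF reference protein k).foldl
          (fun d s => d.insert s (pvM protein k s)) PySem.Dict.empty := by
  simp only [build_kmer_index, pvF, pvL, pvM]
  rw [← PySem.List.foldl_if_eq_foldl_filter, List.foldl_map]

theorem pvKeysA (reference protein : String) (k : Int) :
    (build_kmer_index reference protein k).keys = PySem.Set.ofList (pvF reference protein k) := by
  rw [pvBuildA_eq, PySem.Dict.keys_foldl_insert (f := fun _ s => pvM protein k s)]
  simp [PySem.Set.update_nil_left]

theorem pvGetDA (reference protein : String) (k : Int) (s : String)
    (hs : s ∈ pvF reference protein k) :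
    (build_kmer_index reference protein k).getD s [] = pvM protein k s := by
  rw [pvBuildA_eq, pvGetD_foldl_insert_const]
  simp [hs]

theorem pvGetD_insert_add_one_key {κ : Type} [BEq κ] [LawfulBEq κ] [DecidableEq κ]
    (f : Int → κ) (l : List Int) (d : PySem.Dict κ Int) (s : κ) :
    (l.foldl (fun d j => d.insert (f j) (d.getD (f j) 0 + 1)) d).getD s 0
      = d.getD s 0 + ((l.map f).count s : Int) := by
  induction l generalizing d with
  | nil => simp
  | cons x xs ih =>
    rw [List.foldl_cons, ih, PySem.Dict.getD_insert, List.map_cons, List.count_cons]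
    by_cases h : s = f x
    · subst h; simp; ring
    · simp [h, Ne.symm h]

theorem pvBestCount_eq (p : String) (S : PySem.Set String) (k : Int) :
    pvBestCount p S k
      = (S.map (fun s => ((pvM p k s).length : Int))).foldl max 0 := by
  simp only [pvBestCount]
  rw [List.foldl_map]
  apply PySem.List.foldl_congr_mem
  intro acc x _
  rw [pvGetD_insert_add_one_key (f := fun j => PySem.Str.slice p (some j) (some (j + k)))]
  have hL : ((PySem.List.pyRange 0 (PySem.Str.len p - k + 1) 1).map
      (fun j => PySem.Str.slice p (some j) (some (j + k)))) = pvL p k := rfl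
  rw [hL, pvCount_pvL]
  simp only [PySem.Dict.getD_empty, zero_add]
  omega

theorem pvScore_eq (reference p : String) (k : Int) :
    (get_top_kmer_match (build_kmer_index reference p k)).2
      = pvBestCount p (PySem.Set.ofList (pvL reference k)) k := by
  rw [pvBestCount_eq]
  have hq0 : (0 : Int) ≤ ((PySem.Set.ofList (pvL reference k)).map
      (fun s => ((pvM p k s).length : Int))).foldl max 0 :=
    (PySem.List.le_foldl_max _ 0).1
  have hqmem : ∀ s ∈ PySem.Set.ofList (pvL reference k),
      ((pvM p k s).length : Int) ≤ ((PySem.Set.ofList (pvL reference k)).map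
        (fun s => ((pvM p k s).length : Int))).foldl max 0 := by
    intro s hs
    exact (PySem.List.le_foldl_max _ 0).2 _ (List.mem_map.mpr ⟨s, hs, rfl⟩)
  have hqcases : ((PySem.Set.ofList (pvL reference k)).map
        (fun s => ((pvM p k s).length : Int))).foldl max 0 = 0
      ∨ ∃ s ∈ PySem.Set.ofList (pvL reference k),
          ((PySem.Set.ofList (pvL reference k)).map
            (fun s => ((pvM p k s).length : Int))).foldl max 0 = ((pvM p k s).length : Int) := by
    rcases PySem.List.foldl_max_mem ((PySem.Set.ofList (pvL reference k)).map
        (fun s => ((pvM p k s).length : Int))) 0 with h | h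
    · exact Or.inl h
    · obtain ⟨s, hs, he⟩ := List.mem_map.mp h
      exact Or.inr ⟨s, hs, he.symm⟩
  by_cases hF : pvF reference p k = []
  · -- A's dict is empty; every reference k-mer is absent from the protein, so both sides are 0
    have hk : (build_kmer_index reference p k).keys = [] := by
      rw [pvKeysA, hF]; rfl
    have hD : (build_kmer_index reference p k).items = [] := by
      simp only [PySem.Dict.keys] at hk
      exact List.map_eq_nil_iff.mp hk
    have hzero : ∀ s ∈ pvL reference k, (pvM p k s).length = 0 := by
      intro s hs
      have h1 := List.filter_eq_nil_iff.mp hF s hs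
      have h2 : (pvM p k s).isEmpty = true := by
        cases h : (pvM p k s).isEmpty
        · exact absurd (by simp [h]) h1
        · rfl
      rw [List.isEmpty_iff.mp h2]
      rfl
    have hq : ((PySem.Set.ofList (pvL reference k)).map
        (fun s => ((pvM p k s).length : Int))).foldl max 0 = 0 := by
      rcases hqcases with h | ⟨s, hs, he⟩
      · exact h
      · rw [he, hzero s ((PySem.Set.mem_ofList _ _).mp hs)]; simp
    simp [get_top_kmer_match, hD, hq]
  · obtain ⟨s0, hs0⟩ := List.exists_mem_of_ne_nil _ hF
    have hkeysne : (build_kmer_index reference p k).keys ≠ [] := by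
      rw [pvKeysA]
      intro h
      have : s0 ∈ PySem.Set.ofList (pvF reference p k) := (PySem.Set.mem_ofList _ _).mpr hs0
      rw [h] at this
      exact absurd this (List.not_mem_nil)
    have hne : (build_kmer_index reference p k).items.isEmpty = false := by
      cases h : (build_kmer_index reference p k).items with
      | nil => exact absurd (by simp only [PySem.Dict.keys, h, List.map_nil]) hkeysne
      | cons a t => rfl
    obtain ⟨top, htop⟩ : ∃ t, PySem.List.max? (build_kmer_index reference p k).keys
        (fun kk => PySem.List.len ((build_kmer_index reference p k).getD kk [])) = some t := by
      cases h : PySem.List.max? (build_kmer_index reference p k).keys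
          (fun kk => PySem.List.len ((build_kmer_index reference p k).getD kk [])) with
      | none => exact absurd ((PySem.List.max?_eq_none_iff _ _).mp h) hkeysne
      | some t => exact ⟨t, rfl⟩
    have htopF : top ∈ pvF reference p k := by
      have := PySem.List.max?_mem htop
      rw [pvKeysA] at this
      exact (PySem.Set.mem_ofList _ _).mp this
    have hgd : (build_kmer_index reference p k).getD top [] = pvM p k top :=
      pvGetDA reference p k top htopF
    have htopS : top ∈ PySem.Set.ofList (pvL reference k) :=
      (PySem.Set.mem_ofList _ _).mpr (List.mem_of_mem_filter htopF)
    have hmain : ((pvM p k top).length : Int)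
        = ((PySem.Set.ofList (pvL reference k)).map
            (fun s => ((pvM p k s).length : Int))).foldl max 0 := by
      apply le_antisymm
      · exact hqmem top htopS
      · rcases hqcases with h | ⟨s, hs, he⟩
        · rw [h]; exact Int.natCast_nonneg _
        · rw [he]
          by_cases hse : (pvM p k s).isEmpty
          · simp [List.isEmpty_iff.mp hse]
          · have hsF : s ∈ pvF reference p k :=
              List.mem_filter.mpr ⟨(PySem.Set.mem_ofList _ _).mp hs, by simp [hse]⟩
            have hsK : s ∈ (build_kmer_index reference p k).keys := by
              rw [pvKeysA]; exact (PySem.Set.mem_ofList _ _).mpr hsF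
            have hle := PySem.List.max?_isMax htop s hsK
            rw [pvGetDA reference p k s hsF, hgd] at hle
            simpa [PySem.List.len_eq] using hle
    simp only [get_top_kmer_match, hne, Bool.false_eq_true, if_false, htop]
    simpa [PySem.List.len_eq, hgd] using hmain

theorem pvRank_eq (reference : String) (proteins : List String) (k : Int) :
    rank_proteins_by_matches reference proteins k
      = rank_proteins_by_matches_alt reference proteins k := by
  simp only [rank_proteins_by_matches, rank_proteins_by_matches_alt]
  rw [PySem.List.foldl_append_singleton_eq_map, List.nil_append]
  have hmap : proteins.map
      (fun protein => (protein, (get_top_kmer_match (build_kmer_index reference protein k)).2))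
      = proteins.map (fun p => (p, pvBestCount p (PySem.Set.ofList
          ((PySem.List.pyRange 0 (PySem.Str.len reference - k + 1) 1).map
            (fun i => PySem.Str.slice reference (some i) (some (i + k))))) k)) := by
    apply List.map_congr_left
    intro p _
    have h := pvScore_eq reference p k
    simp only [pvL] at h
    rw [h]
  rw [hmap]

-- ===== VERDICT (by name: the statement is the Claim_ definition above) =====
theorem rank_proteins_by_matches_spec : Claim_equal_rank_proteins_by_matches := by
  intro reference proteins k _
  unfold Spec_rank_proteins_by_matches
  exact pvRank_eq reference proteins k
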